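-- pv_equiv track=rewrite | github.com/ministryofjustice/opg-data-lpa-instructions-preferences | lambdas/image_processor/app/handler.py | merge_continuation_images_into_path_selection
-- ===== SOURCE A (Python) =====
-- def merge_continuation_images_into_path_selection(path_selection, continuation_sheets) -> dict:
--     """
--     Merge continuation images into path selection.
--
--     Args:
--         path_selection (dict): Dictionary containing paths for preferences and instructions.
--         continuation_sheets (dict): Dictionary containing continuation sheet paths and their types.
--
--     Returns:
--         dict: A dictionary containing paths for preferences, instructions, and continuation sheets.
--     """
--
--     preferences_continuation_count = 0
--     instructions_continuation_count = 0
--     for continuation_name, continuation_dict in continuation_sheets.items():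
--         for pagenumber, pagenumber_dict in continuation_dict.items():
--             if pagenumber_dict["type"] == "preferences":
--                 preferences_continuation_count += 1
--                 key = f"continuation_preferences_{preferences_continuation_count}"
--             elif pagenumber_dict["type"] == "instructions":
--                 instructions_continuation_count += 1
--                 key = f"continuation_instructions_{instructions_continuation_count}"
--             else:
--                 continue
--             # Add the page path to the corresponding key in final_path_selection
--             path_selection[key] = pagenumber_dict["path"]
--
--     return path_selection
-- ===== SOURCE B (Python) =====
-- def merge_continuation_images_into_path_selection(path_selection, continuation_sheets) -> dict:
--     """Merge continuation images into path selection.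
--
--     Counter-free numbering: each recognised page's number is recomputed as the
--     count of its own type among the types up to and including it, instead of
--     maintaining running counters.
--     """
--     prefixes = {"preferences": "continuation_preferences",
--                 "instructions": "continuation_instructions"}
--     pages = [page for sheet in continuation_sheets.values() for page in sheet.values()]
--     types = [page["type"] for page in pages]
--     for i, (t, page) in enumerate(zip(types, pages)):
--         if t in prefixes:
--             n = types[:i + 1].count(t)
--             path_selection[f"{prefixes[t]}_{n}"] = page["path"]
--     return path_selection
-- ===== Notes on version B (the rewrite author's own statement) =====
-- stated objective: alternative
-- what changed: Replaces A's single stateful pass with two running counters by a counter-free, staged formulation: flatten the pages, precompute the list of their types, and number each recognised page by recomputing the count of its type in the prefix of pages up to and including it.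
import Mathlib
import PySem

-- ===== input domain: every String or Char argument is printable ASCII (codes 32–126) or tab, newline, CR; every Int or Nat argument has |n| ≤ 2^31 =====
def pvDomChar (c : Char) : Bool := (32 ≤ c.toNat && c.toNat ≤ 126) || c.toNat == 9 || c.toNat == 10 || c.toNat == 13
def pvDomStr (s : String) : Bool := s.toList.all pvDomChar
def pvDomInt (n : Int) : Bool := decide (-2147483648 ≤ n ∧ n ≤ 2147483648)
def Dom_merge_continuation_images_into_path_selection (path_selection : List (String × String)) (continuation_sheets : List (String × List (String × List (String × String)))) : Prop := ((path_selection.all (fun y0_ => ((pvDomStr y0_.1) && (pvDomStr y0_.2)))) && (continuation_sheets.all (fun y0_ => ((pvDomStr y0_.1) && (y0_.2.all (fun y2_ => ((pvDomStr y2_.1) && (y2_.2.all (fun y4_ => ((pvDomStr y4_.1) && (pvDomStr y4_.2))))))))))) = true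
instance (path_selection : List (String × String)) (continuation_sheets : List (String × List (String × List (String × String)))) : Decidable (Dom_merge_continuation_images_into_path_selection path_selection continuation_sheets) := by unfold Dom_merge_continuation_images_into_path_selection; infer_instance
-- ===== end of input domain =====

-- B re-derives the same merged dict counter-free: flatten the pages, precompute the type list,
-- and number each recognised page by counting its type in the prefix up to it; A is reproduced
-- exactly, including in-place mutation of path_selection and insertion order (return value proved).


-- ===== PORT A =====
-- loop body of A (the two counters and the dict being built are the fold state);
-- pagenumber_dict["type"] / ["path"] are KeyErrors in Python when missing: excluded by Pre_ below,
-- here PySem.Dict.getD with an unused "" default.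
def pvStepA (st : Int × Int × PySem.Dict String String) (page : List (String × String)) :
    Int × Int × PySem.Dict String String :=
  let d := PySem.Dict.mk page
  if PySem.Dict.getD d "type" "" = "preferences" then
    let c := st.1 + 1
    (c, st.2.1, (st.2.2).insert ("continuation_preferences_" ++ PySem.Int.toStr c) (PySem.Dict.getD d "path" ""))
  else if PySem.Dict.getD d "type" "" = "instructions" then
    let c := st.2.1 + 1
    (st.1, c, (st.2.2).insert ("continuation_instructions_" ++ PySem.Int.toStr c) (PySem.Dict.getD d "path" ""))
  else st

def merge_continuation_images_into_path_selection (path_selection : List (String × String)) (continuation_sheets : List (String × List (String × List (String × String)))) : List (String × String) :=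
  (continuation_sheets.foldl
    (fun st sheet => sheet.2.foldl (fun st page => pvStepA st page.2) st)
    (0, 0, PySem.Dict.mk path_selection)).2.2.items

-- ===== PORT B =====
-- the prefixes table of B
def pvPrefixes : PySem.Dict String String :=
  PySem.Dict.mk [("preferences", "continuation_preferences"), ("instructions", "continuation_instructions")]

-- loop body of B (types is the precomputed type list; the dict being mutated is the state;
-- ip = (i, (t, page)) from enumerate(zip(types, pages)))
def pvStepB (types : List String) (acc : PySem.Dict String String)
    (ip : Int × (String × List (String × String))) : PySem.Dict String String :=
  if PySem.Dict.contains pvPrefixes ip.2.1 then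
    acc.insert
      (PySem.Dict.getD pvPrefixes ip.2.1 "" ++ "_" ++
        PySem.Int.toStr ((PySem.List.count (PySem.List.slice types none (some (ip.1 + 1))) ip.2.1 : Nat) : Int))
      (PySem.Dict.getD (PySem.Dict.mk ip.2.2) "path" "")
  else acc

def merge_continuation_images_into_path_selection_alt (path_selection : List (String × String)) (continuation_sheets : List (String × List (String × List (String × String)))) : List (String × String) :=
  let pages := continuation_sheets.flatMap (fun sheet => sheet.2.map (fun page => page.2))
  let types := pages.map (fun p => PySem.Dict.getD (PySem.Dict.mk p) "type" "")
  ((PySem.List.enumerate (types.zip pages) 0).foldl (pvStepB types) (PySem.Dict.mk path_selection)).items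

-- ===== PRECONDITION & SPEC =====
-- Pre_ excludes exactly the inputs where Python A raises KeyError: a page dict without a "type"
-- key, or a page of a recognised type without a "path" key (B raises the same way there).
def Pre_merge_continuation_images_into_path_selection (path_selection : List (String × String)) (continuation_sheets : List (String × List (String × List (String × String)))) : Prop :=
  ∀ sheet ∈ continuation_sheets, ∀ page ∈ sheet.2,
    PySem.Dict.contains (PySem.Dict.mk page.2) "type" = true ∧
    ((PySem.Dict.getD (PySem.Dict.mk page.2) "type" "" = "preferences" ∨
      PySem.Dict.getD (PySem.Dict.mk page.2) "type" "" = "instructions") →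
      PySem.Dict.contains (PySem.Dict.mk page.2) "path" = true)

instance (path_selection : List (String × String)) (continuation_sheets : List (String × List (String × List (String × String)))) : Decidable (Pre_merge_continuation_images_into_path_selection path_selection continuation_sheets) := by unfold Pre_merge_continuation_images_into_path_selection; infer_instance

def pvWitness_merge_continuation_images_into_path_selection : (List (String × String)) × (List (String × List (String × List (String × String)))) :=
  ([("preferences", "p.jpg")],
   [("sheet1", [("1", [("type", "preferences"), ("path", "a.jpg")]),
                ("2", [("type", "instructions"), ("path", "b.jpg")])]),
    ("sheet2", [("1", [("type", "preferences"), ("path", "c.jpg")]),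
                ("2", [("type", "other"), ("path", "d.jpg")])])])

def Spec_merge_continuation_images_into_path_selection (path_selection : List (String × String)) (continuation_sheets : List (String × List (String × List (String × String)))) (out : List (String × String)) : Prop := out = merge_continuation_images_into_path_selection_alt path_selection continuation_sheets
instance (path_selection : List (String × String)) (continuation_sheets : List (String × List (String × List (String × String)))) (out : List (String × String)) : Decidable (Spec_merge_continuation_images_into_path_selection path_selection continuation_sheets out) := by unfold Spec_merge_continuation_images_into_path_selection; infer_instance

-- ===== CLAIM (what is proved, stated in full; the proofs are below) =====
def Claim_equal_merge_continuation_images_into_path_selection : Prop := ∀ (path_selection : List (String × String)) (continuation_sheets : List (String × List (String × List (String × String)))), Dom_merge_continuation_images_into_path_selection path_selection continuation_sheets → Pre_merge_continuation_images_into_path_selection path_selection continuation_sheets → Spec_merge_continuation_images_into_path_selection path_selection continuation_sheets (merge_continuation_images_into_path_selection path_selection continuation_sheets)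

-- ===== LEMMAS AND PROOFS =====

-- the type of a page dict, as both programs read it
def pvTy (p : List (String × String)) : String := PySem.Dict.getD (PySem.Dict.mk p) "type" ""

-- A's nested loop over sheets and pages is the flat loop over the flattened page list.
lemma pv_nested_eq_flat (cs : List (String × List (String × List (String × String))))
    (st : Int × Int × PySem.Dict String String) :
    cs.foldl (fun st sheet => sheet.2.foldl (fun st page => pvStepA st page.2) st) st
      = (cs.flatMap (fun sheet => sheet.2.map (fun page => page.2))).foldl pvStepA st := by
  induction cs generalizing st with
  | nil => rfl
  | cons sheet rest ih =>
      simp only [List.foldl_cons, List.flatMap_cons, List.foldl_append, List.foldl_map]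
      exact ih _

-- Core invariant: after processing the pages of `done`, A's counters are exactly the counts of
-- the two recognised types among the types of `done`, and running A's loop on the remaining
-- pages equals running B's enumerated loop on the remaining (type, page) pairs starting at
-- index done.length, over the full precomputed type list.
lemma pv_key (full : List (List (String × String))) :
    ∀ (rest done : List (List (String × String))) (d : PySem.Dict String String),
    full = done ++ rest →
    (rest.foldl pvStepA
        ((((full.map pvTy).take done.length).count "preferences" : Int),
         (((full.map pvTy).take done.length).count "instructions" : Int), d)).2.2
      = (PySem.List.enumerate (((full.map pvTy).drop done.length).zip rest) (done.length : Int)).foldl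
          (pvStepB (full.map pvTy)) d := by
  intro rest
  induction rest with
  | nil =>
      intro done d h
      simp [List.zip_nil_right, PySem.List.enumerate_nil]
  | cons page rest ih =>
      intro done d h
      have hlen : done.length = (done.map pvTy).length := by simp
      have hT : full.map pvTy = done.map pvTy ++ pvTy page :: rest.map pvTy := by
        rw [h]; simp
      have hdrop : (full.map pvTy).drop done.length = pvTy page :: rest.map pvTy := by
        rw [hT, hlen, List.drop_left]
      have htake : (full.map pvTy).take done.length = done.map pvTy := by
        rw [hT, hlen, List.take_left]
      have htake1 : (full.map pvTy).take (done.length + 1) = done.map pvTy ++ [pvTy page] := by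
        rw [hT, hlen, List.take_append, List.take_of_length_le (by omega), Nat.add_sub_cancel_left]
        rfl
      have hdrop1 : (full.map pvTy).drop (done.length + 1) = rest.map pvTy := by
        rw [hT, hlen, List.drop_append, List.drop_of_length_le (by omega), Nat.add_sub_cancel_left]
        rfl
      have hcast : (done.length : Int) + 1 = ((done.length + 1 : Nat) : Int) := by push_cast; ring
      have hBslice : PySem.List.slice (full.map pvTy) none (some ((done.length : Int) + 1))
          = done.map pvTy ++ [pvTy page] := by
        rw [hcast, PySem.List.slice_to_natCast, htake1]
      have hih := ih (done ++ [page])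
        (pvStepB (full.map pvTy) d ((done.length : Int), (pvTy page, page)))
        (by rw [h]; simp)
      simp only [List.length_append, List.length_cons, List.length_nil, Nat.zero_add] at hih
      rw [hdrop1] at hih
      rw [hdrop, List.zip_cons_cons, PySem.List.enumerate_cons, List.foldl_cons, List.foldl_cons,
        hcast, ← hih]
      have hstate : pvStepA
          ((((full.map pvTy).take done.length).count "preferences" : Int),
           (((full.map pvTy).take done.length).count "instructions" : Int), d) page
          = ((((full.map pvTy).take (done.length + 1)).count "preferences" : Int),
             (((full.map pvTy).take (done.length + 1)).count "instructions" : Int),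
             pvStepB (full.map pvTy) d ((done.length : Int), (pvTy page, page))) := by
        rw [htake, htake1]
        by_cases h1 : pvTy page = "preferences"
        · have h1' : PySem.Dict.getD (PySem.Dict.mk page) "type" "" = "preferences" := h1
          simp only [pvStepA, pvStepB, h1', h1]
          rw [show PySem.Dict.contains pvPrefixes "preferences" = true from rfl]
          rw [show PySem.Dict.getD pvPrefixes "preferences" "" = "continuation_preferences" from rfl]
          simp only [if_true]
          rw [hBslice, h1]
          have hcP : List.count "preferences" (List.map pvTy done ++ ["preferences"])
              = List.count "preferences" (List.map pvTy done) + 1 := by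
            simp [List.count_append]
          have hcI : List.count "instructions" (List.map pvTy done ++ ["preferences"])
              = List.count "instructions" (List.map pvTy done) := by
            simp [List.count_append]
          have hc2 : PySem.List.count (List.map pvTy done ++ ["preferences"]) "preferences"
              = List.count "preferences" (List.map pvTy done) + 1 := by
            rw [PySem.List.count_eq]; simp [List.count_append]
          rw [hcP, hcI, hc2]
          push_cast
          refine Prod.ext rfl (Prod.ext rfl ?_)
          refine congrArg (fun k => PySem.Dict.insert d k (PySem.Dict.getD (PySem.Dict.mk page) "path" "")) ?_
          rw [show ("continuation_preferences_" : String) = "continuation_preferences" ++ "_" from by decide,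
            String.append_assoc]
        · by_cases h2 : pvTy page = "instructions"
          · have h2' : PySem.Dict.getD (PySem.Dict.mk page) "type" "" = "instructions" := h2
            have h1' : ¬ PySem.Dict.getD (PySem.Dict.mk page) "type" "" = "preferences" := h1
            simp only [pvStepA, pvStepB, h2', h2]
            rw [if_neg (show ¬("instructions" : String) = "preferences" from by decide)]
            rw [show PySem.Dict.contains pvPrefixes "instructions" = true from rfl]
            rw [show PySem.Dict.getD pvPrefixes "instructions" "" = "continuation_instructions" from rfl]
            simp only [if_true]
            rw [hBslice, h2]
            have hcP : List.count "preferences" (List.map pvTy done ++ ["instructions"])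
                = List.count "preferences" (List.map pvTy done) := by
              simp [List.count_append]
            have hcI : List.count "instructions" (List.map pvTy done ++ ["instructions"])
                = List.count "instructions" (List.map pvTy done) + 1 := by
              simp [List.count_append]
            have hc2 : PySem.List.count (List.map pvTy done ++ ["instructions"]) "instructions"
                = List.count "instructions" (List.map pvTy done) + 1 := by
              rw [PySem.List.count_eq]; simp [List.count_append]
            rw [hcP, hcI, hc2]
            push_cast
            refine Prod.ext rfl (Prod.ext rfl ?_)
            refine congrArg (fun k => PySem.Dict.insert d k (PySem.Dict.getD (PySem.Dict.mk page) "path" "")) ?_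
            rw [show ("continuation_instructions_" : String) = "continuation_instructions" ++ "_" from by decide,
              String.append_assoc]
          · have h1' : ¬ PySem.Dict.getD (PySem.Dict.mk page) "type" "" = "preferences" := h1
            have h2' : ¬ PySem.Dict.getD (PySem.Dict.mk page) "type" "" = "instructions" := h2
            have hnone : PySem.Dict.get? pvPrefixes (pvTy page) = none := by
              rw [show pvPrefixes = PySem.Dict.mk [("preferences", "continuation_preferences"),
                ("instructions", "continuation_instructions")] from rfl]
              rw [PySem.Dict.get?_mk_cons, PySem.Dict.get?_mk_cons]
              have hne1 : ("preferences" : String) ≠ pvTy page := fun hh => h1 hh.symm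
              have hne2 : ("instructions" : String) ≠ pvTy page := fun hh => h2 hh.symm
              simp [pysem, hne1, hne2]
            have hcf : PySem.Dict.contains pvPrefixes (pvTy page) = false := by
              rw [PySem.Dict.contains_eq_isSome_get?, hnone]
              rfl
            simp only [pvStepA, pvStepB, if_neg h1', if_neg h2', hcf, Bool.false_eq_true, if_false]
            refine Prod.ext ?_ (Prod.ext ?_ rfl) <;>
              simp [List.count_append, h1, h2]
      rw [hstate]

-- ===== VERDICT (by name: the statement is the Claim_ definition above) =====
theorem merge_continuation_images_into_path_selection_spec : Claim_equal_merge_continuation_images_into_path_selection := by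
  intro ps cs _hDom _hPre
  show _ = _
  rw [merge_continuation_images_into_path_selection,
    merge_continuation_images_into_path_selection_alt, pv_nested_eq_flat]
  have h := pv_key (cs.flatMap (fun sheet => sheet.2.map (fun page => page.2)))
    (cs.flatMap (fun sheet => sheet.2.map (fun page => page.2))) [] (PySem.Dict.mk ps) rfl
  simp only [List.length_nil, List.take_zero, List.count_nil, List.drop_zero, Nat.cast_zero] at h
  rw [show pvTy = (fun p => PySem.Dict.getD (PySem.Dict.mk p) "type" "") from rfl] at h
  exact congrArg PySem.Dict.items h
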